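-- pv_equiv track=rewrite | github.com/Vurctne/master-budget-automation-tool | budget_automation.py | _contiguous_row_segments
-- ===== SOURCE A (Python) =====
-- from typing import Any, Callable, Dict, List, Optional
--
-- def _contiguous_row_segments(sorted_rows: List[tuple[str, int]]) -> List[List[tuple[str, int]]]:
--     if not sorted_rows:
--         return []
--     segments: List[List[tuple[str, int]]] = [[sorted_rows[0]]]
--     for item in sorted_rows[1:]:
--         if item[1] == segments[-1][-1][1] + 1:
--             segments[-1].append(item)
--         else:
--             segments.append([item])
--     return segments
-- ===== SOURCE B (Python) =====
-- def _contiguous_row_segments(sorted_rows):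
--     segments = []
--     rest = sorted_rows
--     while rest:
--         v0 = rest[0][1]
--         k = 1
--         while k < len(rest) and rest[k][1] == v0 + k:
--             k += 1
--         segments.append(rest[:k])
--         rest = rest[k:]
--     return segments
-- ===== Notes on version B (the rewrite author's own statement) =====
-- stated objective: alternative
-- what changed: B is a two-pointer run-cutter: it scans each consecutive run to its end (value == first value + offset) and emits it as one whole slice, instead of A's stateful fold that appends every item either to the last segment or as a new singleton segment.
import Mathlib
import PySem

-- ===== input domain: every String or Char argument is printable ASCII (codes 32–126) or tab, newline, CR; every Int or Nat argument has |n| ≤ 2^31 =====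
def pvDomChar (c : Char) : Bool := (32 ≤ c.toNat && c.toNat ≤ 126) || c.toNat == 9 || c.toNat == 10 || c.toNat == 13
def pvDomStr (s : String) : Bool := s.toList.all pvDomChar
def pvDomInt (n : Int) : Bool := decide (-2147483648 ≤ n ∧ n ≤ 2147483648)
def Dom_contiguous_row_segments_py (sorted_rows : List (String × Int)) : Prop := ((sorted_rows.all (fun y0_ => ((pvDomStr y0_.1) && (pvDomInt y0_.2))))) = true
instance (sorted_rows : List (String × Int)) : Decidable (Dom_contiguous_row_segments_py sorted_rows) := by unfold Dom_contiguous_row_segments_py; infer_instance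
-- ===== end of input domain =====

-- B replaces A's stateful segment-growing fold by a two-pointer run-cutter that emits whole slices; same values, same cost (objective: alternative).

-- ===== PORT A =====
-- loop body: append item to segments[-1] or open a new segment
def pvStep (segs : List (List (String × Int))) (item : String × Int) : List (List (String × Int)) :=
  if item.2 = (PySem.List.pyGetD (PySem.List.pyGetD segs (-1) []) (-1) ("", 0)).2 + 1 then
    segs.dropLast ++ [PySem.List.pyGetD segs (-1) [] ++ [item]]   -- segments[-1].append(item)
  else
    segs ++ [[item]]

def contiguous_row_segments_py (sorted_rows : List (String × Int)) : List (List (String × Int)) :=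
  match sorted_rows with
  | [] => []                     -- if not sorted_rows: return []
  | x :: _ =>                    -- segments = [[sorted_rows[0]]]
    (PySem.List.slice sorted_rows (some 1) none).foldl pvStep [[x]]   -- for item in sorted_rows[1:]

-- ===== PORT B =====
-- inner while: rest[k][1] == v0 + k, scanning the tail of rest with counter k
def pvRun (v0 k : Int) : List (String × Int) → Int
  | [] => k
  | y :: t => if y.2 = v0 + k then pvRun v0 (k + 1) t else k

-- k ≤ pvRun v0 k t (cited by pvSegLoop's termination proof)
theorem pvRun_le : ∀ (t : List (String × Int)) (v0 k : Int), k ≤ pvRun v0 k t := by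
  intro t
  induction t with
  | nil => intro v0 k; simp [pvRun]
  | cons y t ih =>
    intro v0 k
    simp only [pvRun]
    split
    · exact le_trans (by omega) (ih v0 (k + 1))
    · exact le_refl k

def pvSegLoop (segs : List (List (String × Int))) (rest : List (String × Int)) : List (List (String × Int)) :=
  match rest with
  | [] => segs
  | x :: t =>
    let k := pvRun x.2 1 t
    pvSegLoop (segs ++ [PySem.List.slice (x :: t) none (some k)])   -- segments.append(rest[:k])
      (PySem.List.slice (x :: t) (some k) none)                    -- rest = rest[k:]
termination_by rest.length
decreasing_by
  have h1 : (1 : Int) ≤ pvRun x.2 1 t := pvRun_le t x.2 1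
  rw [PySem.List.slice_from (x :: t) (show (0:Int) ≤ pvRun x.2 1 t by omega)]
  simp only [List.length_drop, List.length_cons]
  omega

def contiguous_row_segments_py_alt (sorted_rows : List (String × Int)) : List (List (String × Int)) :=
  pvSegLoop [] sorted_rows

-- ===== PRECONDITION & SPEC =====
def Spec_contiguous_row_segments_py (sorted_rows : List (String × Int)) (out : List (List (String × Int))) : Prop := out = contiguous_row_segments_py_alt sorted_rows
instance (sorted_rows : List (String × Int)) (out : List (List (String × Int))) : Decidable (Spec_contiguous_row_segments_py sorted_rows out) := by unfold Spec_contiguous_row_segments_py; infer_instance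

-- ===== CLAIM (what is proved, stated in full; the proofs are below) =====
def Claim_equal_contiguous_row_segments_py : Prop := ∀ (sorted_rows : List (String × Int)), Dom_contiguous_row_segments_py sorted_rows → Spec_contiguous_row_segments_py sorted_rows (contiguous_row_segments_py sorted_rows)

-- ===== LEMMAS AND PROOFS =====

-- reference shape: segments of x :: t, by structural recursion on the adjacent +1 condition
def pvSeg (x : String × Int) : List (String × Int) → List (List (String × Int))
  | [] => [[x]]
  | y :: t =>
    if y.2 = x.2 + 1 then
      match pvSeg y t with
      | [] => [[x]]
      | g :: gs => (x :: g) :: gs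
    else
      [x] :: pvSeg y t

def pvSegs : List (String × Int) → List (List (String × Int))
  | [] => []
  | x :: t => pvSeg x t

def pvPrep (c : List (String × Int)) : List (List (String × Int)) → List (List (String × Int))
  | [] => [c]
  | g :: gs => (c ++ g) :: gs

theorem pvSeg_shape : ∀ (t : List (String × Int)) (x : String × Int),
    ∃ g gs, pvSeg x t = (x :: g) :: gs := by
  intro t
  induction t with
  | nil => intro x; exact ⟨[], [], rfl⟩
  | cons y t ih =>
    intro x
    obtain ⟨g, gs, hg⟩ := ih y
    by_cases h : y.2 = x.2 + 1
    · exact ⟨y :: g, gs, by simp [pvSeg, h, hg]⟩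
    · exact ⟨[], pvSeg y t, by simp [pvSeg, h]⟩

-- A's fold with a nonempty last segment equals pvPrep of the reference segmentation
theorem pvFoldA : ∀ (items : List (String × Int)) (pre : List (List (String × Int)))
    (c : List (String × Int)) (lx : String × Int),
    List.foldl pvStep (pre ++ [c ++ [lx]]) items = pre ++ pvPrep c (pvSeg lx items) := by
  intro items
  induction items with
  | nil => intro pre c lx; simp [pvSeg, pvPrep]
  | cons item rest ih =>
    intro pre c lx
    have hlast := PySem.List.pyGetD_neg_one_append_singleton pre (c ++ [lx]) ([] : List (String × Int))
    have hlx := PySem.List.pyGetD_neg_one_append_singleton c lx ("", 0)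
    obtain ⟨g, gs, hg⟩ := pvSeg_shape rest item
    simp only [List.foldl_cons, pvStep, hlast, hlx]
    by_cases h : item.2 = lx.2 + 1
    · rw [if_pos h, List.dropLast_concat, ih pre (c ++ [lx]) item]
      simp [pvSeg, h, hg, pvPrep]
    · rw [if_neg h]
      have e : pre ++ [c ++ [lx]] ++ [[item]] = (pre ++ [c ++ [lx]]) ++ [([] : List (String × Int)) ++ [item]] := by simp
      rw [e, ih (pre ++ [c ++ [lx]]) [] item]
      simp [pvSeg, h, hg, pvPrep]

theorem pvA_eq_pvSegs (l : List (String × Int)) : contiguous_row_segments_py l = pvSegs l := by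
  cases l with
  | nil => rfl
  | cons x t =>
    simp only [contiguous_row_segments_py, PySem.List.slice_from_one, List.tail_cons, pvSegs]
    obtain ⟨g, gs, hg⟩ := pvSeg_shape t x
    have h := pvFoldA t [] [] x
    simpa [pvPrep, hg] using h

-- run-length recurrence
theorem pvRun_succ : ∀ (t : List (String × Int)) (v0 k : Int),
    pvRun v0 (k + 1) t = 1 + pvRun (v0 + 1) k t := by
  intro t
  induction t with
  | nil => intro v0 k; simp [pvRun]; omega
  | cons y t ih =>
    intro v0 k
    simp only [pvRun]
    by_cases h : y.2 = v0 + (k + 1)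
    · rw [if_pos h, if_pos (by omega), ih]
    · rw [if_neg h, if_neg (by omega)]; omega

theorem pvRun_one_cons (x y : String × Int) (t : List (String × Int)) :
    pvRun x.2 1 (y :: t) = if y.2 = x.2 + 1 then 1 + pvRun y.2 1 t else 1 := by
  simp only [pvRun]
  by_cases h : y.2 = x.2 + 1
  · rw [if_pos (by omega), if_pos h, show (1 : Int) + 1 = 1 + 1 from rfl]
    rw [show pvRun x.2 (1 + 1) t = 1 + pvRun (x.2 + 1) 1 t from pvRun_succ t x.2 1, h]
  · rw [if_neg (by omega), if_neg h]

-- the first run of x :: t is exactly the first reference segment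
theorem pvSeg_run : ∀ (t : List (String × Int)) (x : String × Int),
    pvSeg x t = (x :: t.take ((pvRun x.2 1 t).toNat - 1)) ::
      pvSegs (t.drop ((pvRun x.2 1 t).toNat - 1)) := by
  intro t
  induction t with
  | nil => intro x; simp [pvSeg, pvRun, pvSegs]
  | cons y t ih =>
    intro x
    rw [pvRun_one_cons]
    by_cases h : y.2 = x.2 + 1
    · rw [if_pos h]
      have h1 : (1 : Int) ≤ pvRun y.2 1 t := pvRun_le t y.2 1
      have hm : (1 + pvRun y.2 1 t).toNat - 1 = (pvRun y.2 1 t).toNat := by omega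
      have hmm : (pvRun y.2 1 t).toNat = ((pvRun y.2 1 t).toNat - 1) + 1 := by omega
      rw [hm, hmm, List.take_succ_cons, List.drop_succ_cons]
      simp [pvSeg, h, ih y]
    · rw [if_neg h]
      simp [pvSeg, h, pvSegs]

theorem pvSegLoop_aux : ∀ (n : Nat) (rest : List (String × Int)) (segs : List (List (String × Int))),
    rest.length ≤ n → pvSegLoop segs rest = segs ++ pvSegs rest := by
  intro n
  induction n with
  | zero =>
    intro rest segs hlen
    have : rest = [] := List.eq_nil_of_length_eq_zero (by omega)
    subst this
    simp [pvSegLoop, pvSegs]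
  | succ n ih =>
    intro rest segs hlen
    match rest with
    | [] => simp [pvSegLoop, pvSegs]
    | x :: t =>
      rw [pvSegLoop]
      have h1 : (1 : Int) ≤ pvRun x.2 1 t := pvRun_le t x.2 1
      rw [PySem.List.slice_to (x :: t) (show (0:Int) ≤ pvRun x.2 1 t by omega),
          PySem.List.slice_from (x :: t) (show (0:Int) ≤ pvRun x.2 1 t by omega)]
      have hk : (pvRun x.2 1 t).toNat = ((pvRun x.2 1 t).toNat - 1) + 1 := by omega
      rw [hk, List.take_succ_cons, List.drop_succ_cons]
      rw [ih (List.drop ((pvRun x.2 1 t).toNat - 1) t) _ (by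
        simp only [List.length_drop]
        simp only [List.length_cons] at hlen
        omega)]
      rw [List.append_assoc]
      congr 1
      rw [show pvSegs (x :: t) = pvSeg x t from rfl, pvSeg_run t x]
      simp

theorem pvSegLoop_eq (rest : List (String × Int)) (segs : List (List (String × Int))) :
    pvSegLoop segs rest = segs ++ pvSegs rest :=
  pvSegLoop_aux rest.length rest segs (le_refl _)

-- ===== VERDICT (by name: the statement is the Claim_ definition above) =====
theorem contiguous_row_segments_py_spec : Claim_equal_contiguous_row_segments_py := by
  intro sorted_rows _
  show contiguous_row_segments_py sorted_rows = contiguous_row_segments_py_alt sorted_rows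
  rw [pvA_eq_pvSegs, contiguous_row_segments_py_alt, pvSegLoop_eq]
  simp
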